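-- pv_equiv track=rewrite | github.com/vefthym/fairER | samplers/SUSIE.py | get_comps_dict
-- ===== SOURCE A (Python) =====
-- def get_comps_dict(comp):
--     comps_dict = {}
--     for c in comp:
--         if len(c) not in comps_dict:
--             comps_dict[len(c)] = set()
--         for i in c:
--             comps_dict[len(c)].add(i)
--     return comps_dict
-- ===== SOURCE B (Python) =====
-- def get_comps_dict(comp):
--     lengths = list(dict.fromkeys(len(c) for c in comp))
--     return {L: set(i for c in comp if len(c) == L for i in c) for L in lengths}
-- ===== Notes on version B (the rewrite author's own statement) =====
-- stated objective: alternative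
-- what changed: A accumulates a dict of sets incrementally in one pass, element by element; B first collects the distinct lengths in first-occurrence order and then builds each length's set in one gathered comprehension over the matching collections.
import Mathlib
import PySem

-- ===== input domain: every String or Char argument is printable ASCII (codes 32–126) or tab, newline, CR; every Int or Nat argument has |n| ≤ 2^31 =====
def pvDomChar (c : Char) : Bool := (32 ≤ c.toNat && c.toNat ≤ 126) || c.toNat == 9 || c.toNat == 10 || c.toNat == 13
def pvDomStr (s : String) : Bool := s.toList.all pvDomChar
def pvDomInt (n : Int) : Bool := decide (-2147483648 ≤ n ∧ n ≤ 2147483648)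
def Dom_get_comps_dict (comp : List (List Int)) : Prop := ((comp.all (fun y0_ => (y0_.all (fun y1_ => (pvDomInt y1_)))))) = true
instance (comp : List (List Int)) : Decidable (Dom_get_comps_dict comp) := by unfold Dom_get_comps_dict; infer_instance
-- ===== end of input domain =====

-- B replaces A's single-pass incremental dict/set accumulation by a two-pass decomposition
-- (first the distinct lengths in first-occurrence order, then one gathered union per length);
-- objective: alternative structure, same exact return value.

-- ===== PORT A =====
-- body of A's outer loop: conditional key creation, then the inner 'for i in c: add' loop
def pvStepA (d : PySem.Dict Int (List Int)) (c : List Int) : PySem.Dict Int (List Int) :=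
  let d' := if d.contains (c.length : Int) then d
            else d.insert (c.length : Int) PySem.Set.empty
  c.foldl (fun d i => d.modify (c.length : Int) PySem.Set.empty (fun s => PySem.Set.add s i)) d'

def get_comps_dict (comp : List (List Int)) : List (Int × List Int) :=
  (comp.foldl pvStepA PySem.Dict.empty).items

-- ===== PORT B =====
def get_comps_dict_alt (comp : List (List Int)) : List (Int × List Int) :=
  let lengths := PySem.List.dedup (comp.map (fun c => (c.length : Int)))
  lengths.map (fun L =>
    (L, PySem.Set.ofList ((comp.filter (fun c => (c.length : Int) == L)).flatten)))

-- ===== PRECONDITION & SPEC =====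
def Spec_get_comps_dict (comp : List (List Int)) (out : List (Int × List Int)) : Prop := out = get_comps_dict_alt comp
instance (comp : List (List Int)) (out : List (Int × List Int)) : Decidable (Spec_get_comps_dict comp out) := by unfold Spec_get_comps_dict; infer_instance

-- ===== CLAIM (what is proved, stated in full; the proofs are below) =====
def Claim_equal_get_comps_dict : Prop := ∀ (comp : List (List Int)), Dom_get_comps_dict comp → Spec_get_comps_dict comp (get_comps_dict comp)

-- ===== LEMMAS AND PROOFS =====

-- the inner add-loop changes only the value at key K
theorem pv_getD_inner (c : List Int) (K L : Int) (d : PySem.Dict Int (List Int)) :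
    (c.foldl (fun d i => d.modify K PySem.Set.empty (fun s => PySem.Set.add s i)) d).getD L PySem.Set.empty
      = if K = L then c.foldl PySem.Set.add (d.getD L PySem.Set.empty) else d.getD L PySem.Set.empty := by
  induction c generalizing d with
  | nil => simp
  | cons x xs ih =>
      simp only [List.foldl_cons, ih]
      by_cases h : K = L
      · subst h
        simp [PySem.Dict.getD_modify_self]
      · rw [PySem.Dict.getD_modify_of_ne _ _ _ (Ne.symm h)]
        simp [h]

-- the inner add-loop never touches the key list (its key is already present)
theorem pv_keys_inner (c : List Int) (K : Int) (d : PySem.Dict Int (List Int))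
    (h : d.contains K = true) :
    (c.foldl (fun d i => d.modify K PySem.Set.empty (fun s => PySem.Set.add s i)) d).keys = d.keys := by
  induction c generalizing d with
  | nil => rfl
  | cons x xs ih =>
      simp only [List.foldl_cons]
      rw [ih _ (by simp [PySem.Dict.contains_modify, h]),
        PySem.Dict.keys_modify, PySem.Dict.keys_insert_of_contains _ _ h]

-- one outer-loop step, value view
theorem pv_getD_step (c : List Int) (L : Int) (d : PySem.Dict Int (List Int)) :
    (pvStepA d c).getD L PySem.Set.empty
      = if (c.length : Int) = L then c.foldl PySem.Set.add (d.getD L PySem.Set.empty)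
        else d.getD L PySem.Set.empty := by
  unfold pvStepA
  rw [pv_getD_inner]
  by_cases h : (c.length : Int) = L
  · subst h
    by_cases hc : d.contains (c.length : Int)
    · simp [hc]
    · simp only [Bool.not_eq_true] at hc
      rw [PySem.Dict.getD_of_not_contains _ _ hc]
      simp [hc, PySem.Dict.getD_insert_self, PySem.Set.empty]
  · by_cases hc : d.contains (c.length : Int)
    · simp [hc, h]
    · simp only [Bool.not_eq_true] at hc
      rw [if_neg h, if_neg h]
      simp only [hc, Bool.false_eq_true, if_false]
      rw [PySem.Dict.getD_insert_of_ne _ _ _ (Ne.symm h)]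

-- accumulated value view of the whole loop
theorem pv_getD_fold (comp : List (List Int)) (L : Int) (d : PySem.Dict Int (List Int)) :
    (comp.foldl pvStepA d).getD L PySem.Set.empty
      = ((comp.filter (fun c => (c.length : Int) == L)).flatten).foldl PySem.Set.add
          (d.getD L PySem.Set.empty) := by
  induction comp generalizing d with
  | nil => simp
  | cons c cs ih =>
      simp only [List.foldl_cons, List.filter_cons, ih, pv_getD_step]
      by_cases h : (c.length : Int) = L
      · simp [h, List.foldl_append]
      · simp [h]

-- key view of one outer-loop step
theorem pv_keys_step (d : PySem.Dict Int (List Int)) (c : List Int) :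
    (pvStepA d c).keys = PySem.Set.add d.keys (c.length : Int) := by
  unfold pvStepA
  by_cases hc : d.contains (c.length : Int)
  · have hm : ((c.length : Int)) ∈ d.keys := (PySem.Dict.contains_iff_mem_keys _ _).1 hc
    rw [if_pos hc, pv_keys_inner _ _ _ hc]
    simp [PySem.Set.add, PySem.Set.contains, hm]
  · simp only [Bool.not_eq_true] at hc
    have hm : ¬ ((c.length : Int)) ∈ d.keys := fun h =>
      by simp [(PySem.Dict.contains_iff_mem_keys _ _).2 h] at hc
    rw [if_neg (by simp [hc]),
      pv_keys_inner _ _ _ (by simp [PySem.Dict.contains_insert_self]),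
      PySem.Dict.keys_insert_of_not_contains _ _ hc]
    simp [PySem.Set.add, PySem.Set.contains, hm]

theorem pv_keys_fold (comp : List (List Int)) (d : PySem.Dict Int (List Int)) :
    (comp.foldl pvStepA d).keys = (comp.map (fun c => (c.length : Int))).foldl PySem.Set.add d.keys := by
  induction comp generalizing d with
  | nil => simp
  | cons c cs ih => simp [List.foldl_cons, ih, pv_keys_step]

theorem pv_nodup_addfold (l : List Int) (s : PySem.Set Int) (hs : s.Nodup) :
    (l.foldl PySem.Set.add s).Nodup := by
  induction l generalizing s with
  | nil => exact hs
  | cons x xs ih => exact ih _ (PySem.Set.nodup_add s x hs)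

-- ===== VERDICT (by name: the statement is the Claim_ definition above) =====
theorem get_comps_dict_spec : Claim_equal_get_comps_dict := by
  intro comp _
  unfold Spec_get_comps_dict get_comps_dict get_comps_dict_alt
  have hnd : (comp.foldl pvStepA PySem.Dict.empty).keys.Nodup := by
    rw [pv_keys_fold]
    exact pv_nodup_addfold _ _ (by simp [PySem.Dict.keys_empty])
  rw [PySem.Dict.items_eq_map_keys _ hnd PySem.Set.empty]
  rw [pv_keys_fold]
  have hk : (comp.map (fun c => (c.length : Int))).foldl PySem.Set.add (PySem.Dict.empty (κ := Int) (ν := List Int)).keys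
      = PySem.List.dedup (comp.map (fun c => (c.length : Int))) := by
    rw [PySem.List.dedup_eq_ofList, PySem.Set.ofList_eq_foldl, PySem.Dict.keys_empty]
  rw [hk]
  apply List.map_congr_left
  intro L _
  rw [pv_getD_fold]
  rw [PySem.Dict.getD_empty, PySem.Set.ofList_eq_foldl]
  simp [PySem.Set.empty]
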